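-- pv_equiv track=rewrite | github.com/Homoon-ryu/2con_0mod4-cycle_free | graph_generator.py | generate_all_graphs_with_fixed_edges
-- ===== SOURCE A (Python) =====
-- import itertools
--
-- def generate_all_graphs_with_fixed_edges(n, fixed_edges):
--     all_edges = [(i, j) for i in range(n) for j in range(i+1, n)]
--     fixed_set = set(fixed_edges)
--     free_edges = [e for e in all_edges if e not in fixed_set]
--
--     for bits in itertools.product([0, 1], repeat=len(free_edges)):
--         # initialize adjacency matrix
--         adj = [[0]*n for _ in range(n)]
--
--         # insert fixed edges
--         for u, v in fixed_edges:
--             adj[u][v] = adj[v][u] = 1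
--
--         # insert free edges based on current combination
--         for idx, (u, v) in enumerate(free_edges):
--             if bits[idx] == 1:
--                 adj[u][v] = adj[v][u] = 1
--
--         yield adj
-- ===== SOURCE B (Python) =====
-- def generate_all_graphs_with_fixed_edges(n, fixed_edges):
--     # Backtracking over the free edges (0-branch before 1-branch) instead of
--     # materialising itertools.product bit tuples; same lexicographic yield order.
--     free_edges = [(i, j) for i in range(n) for j in range(i + 1, n)
--                   if (i, j) not in fixed_edges]
--     adj = [[0] * n for _ in range(n)]
--     for u, v in fixed_edges:
--         adj[u][v] = adj[v][u] = 1
--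
--     def rec(k):
--         if k == len(free_edges):
--             yield [row[:] for row in adj]
--             return
--         yield from rec(k + 1)                      # edge absent first
--         u, v = free_edges[k]
--         saved_uv, saved_vu = adj[u][v], adj[v][u]
--         adj[u][v] = adj[v][u] = 1
--         yield from rec(k + 1)                      # then edge present
--         adj[u][v], adj[v][u] = saved_uv, saved_vu  # backtrack
--
--     yield from rec(0)
-- ===== Notes on version B (the rewrite author's own statement) =====
-- stated objective: alternative
-- what changed: Replaces the itertools.product bit-tuple enumeration (rebuilding the whole matrix from scratch for each combination) with recursive backtracking over the free-edge list that maintains one working matrix, trying edge-absent before edge-present to keep the exact lexicographic yield order.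
import Mathlib
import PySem

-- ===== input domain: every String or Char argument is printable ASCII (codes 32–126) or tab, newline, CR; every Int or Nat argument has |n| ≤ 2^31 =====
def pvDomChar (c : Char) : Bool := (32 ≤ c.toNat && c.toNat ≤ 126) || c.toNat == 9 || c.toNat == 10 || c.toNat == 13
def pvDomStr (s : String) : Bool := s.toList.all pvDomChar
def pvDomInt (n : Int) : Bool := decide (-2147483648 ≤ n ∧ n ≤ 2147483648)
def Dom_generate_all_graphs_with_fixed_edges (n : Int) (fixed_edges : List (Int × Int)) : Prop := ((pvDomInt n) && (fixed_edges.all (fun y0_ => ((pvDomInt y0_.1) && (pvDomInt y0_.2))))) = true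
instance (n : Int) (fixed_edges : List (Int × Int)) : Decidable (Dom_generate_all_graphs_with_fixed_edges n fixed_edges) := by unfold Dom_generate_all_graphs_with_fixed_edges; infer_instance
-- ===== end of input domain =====

-- B replaces A's itertools.product bit-tuple enumeration by recursive backtracking over
-- the free-edge list (0-branch before 1-branch), preserving A's exact yield order.


-- ===== PORT A =====
-- shared primitive: Python's `xs[i] = v` on a list (negative indices wrap; out of range
-- raises IndexError — Pre_ excludes that, the else-branch is never reached inside Pre_)
def pvSetAt (xs : List Int) (i : Int) (v : Int) : List Int :=
  let j := if i < 0 then i + (xs.length : Int) else i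
  if 0 ≤ j ∧ j < (xs.length : Int) then xs.set j.toNat v else xs

-- Python's `adj[u][v] = 1`
def pvSetCell (adj : List (List Int)) (u v : Int) : List (List Int) :=
  let j := if u < 0 then u + (adj.length : Int) else u
  if 0 ≤ j ∧ j < (adj.length : Int) then adj.set j.toNat (pvSetAt (adj.getD j.toNat []) v 1)
  else adj

-- Python's `adj[u][v] = adj[v][u] = 1` (left target assigned first)
def pvSetSym (adj : List (List Int)) (u v : Int) : List (List Int) :=
  pvSetCell (pvSetCell adj u v) v u

-- [(i, j) for i in range(n) for j in range(i+1, n)]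
def pvAllEdges (n : Int) : List (Int × Int) :=
  (PySem.List.pyRange 0 n 1).flatMap (fun i => (PySem.List.pyRange (i + 1) n 1).map (fun j => (i, j)))

-- itertools.product([0, 1], repeat=k), in yield order (leftmost coordinate slowest)
def pvBits : Nat → List (List Int)
  | 0 => [[]]
  | k + 1 => (pvBits k).map (fun t => 0 :: t) ++ (pvBits k).map (fun t => 1 :: t)

-- `[[0]*n for _ in range(n)]`
def pvZeroMatrix (n : Int) : List (List Int) :=
  List.replicate n.toNat (List.replicate n.toNat 0)

-- body of A's inner free-edge loop
def pvStep (bits : List Int) (a : List (List Int)) (p : Int × (Int × Int)) : List (List Int) :=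
  if PySem.List.pyGetD bits p.1 0 = 1 then pvSetSym a p.2.1 p.2.2 else a

def generate_all_graphs_with_fixed_edges (n : Int) (fixed_edges : List (Int × Int)) : List (List (List Int)) :=
  let all_edges := pvAllEdges n
  let fixed_set := PySem.Set.ofList fixed_edges
  let free_edges := all_edges.filter (fun e => !(PySem.Set.contains fixed_set e))
  (pvBits free_edges.length).map (fun bits =>
    let adj := pvZeroMatrix n
    let adj := fixed_edges.foldl (fun a e => pvSetSym a e.1 e.2) adj
    (PySem.List.enumerate free_edges 0).foldl (pvStep bits) adj)

-- ===== PORT B =====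
-- backtracking recursion over the free edges: edge absent first, then edge present
def pvGo (adj : List (List Int)) : List (Int × Int) → List (List (List Int))
  | [] => [adj]
  | e :: rest => pvGo adj rest ++ pvGo (pvSetSym adj e.1 e.2) rest

def generate_all_graphs_with_fixed_edges_alt (n : Int) (fixed_edges : List (Int × Int)) : List (List (List Int)) :=
  let free_edges := (pvAllEdges n).filter (fun e => !(fixed_edges.contains e))
  let base := fixed_edges.foldl (fun a e => pvSetSym a e.1 e.2) (pvZeroMatrix n)
  pvGo base free_edges

-- ===== PRECONDITION & SPEC =====
-- Pre_ excludes exactly the inputs where Python A raises IndexError: a fixed edge whose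
-- endpoint is outside the valid index range [-n, n) of the n×n matrix.
def Pre_generate_all_graphs_with_fixed_edges (n : Int) (fixed_edges : List (Int × Int)) : Prop :=
  ∀ e ∈ fixed_edges, (-n ≤ e.1 ∧ e.1 < n) ∧ (-n ≤ e.2 ∧ e.2 < n)
instance (n : Int) (fixed_edges : List (Int × Int)) : Decidable (Pre_generate_all_graphs_with_fixed_edges n fixed_edges) := by unfold Pre_generate_all_graphs_with_fixed_edges; infer_instance
def pvWitness_generate_all_graphs_with_fixed_edges : Int × (List (Int × Int)) := (3, [(0, 1)])

def Spec_generate_all_graphs_with_fixed_edges (n : Int) (fixed_edges : List (Int × Int)) (out : List (List (List Int))) : Prop := out = generate_all_graphs_with_fixed_edges_alt n fixed_edges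
instance (n : Int) (fixed_edges : List (Int × Int)) (out : List (List (List Int))) : Decidable (Spec_generate_all_graphs_with_fixed_edges n fixed_edges out) := by unfold Spec_generate_all_graphs_with_fixed_edges; infer_instance

-- ===== CLAIM (what is proved, stated in full; the proofs are below) =====
def Claim_equal_generate_all_graphs_with_fixed_edges : Prop := ∀ (n : Int) (fixed_edges : List (Int × Int)), Dom_generate_all_graphs_with_fixed_edges n fixed_edges → Pre_generate_all_graphs_with_fixed_edges n fixed_edges → Spec_generate_all_graphs_with_fixed_edges n fixed_edges (generate_all_graphs_with_fixed_edges n fixed_edges)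

-- ===== LEMMAS AND PROOFS =====

-- x in set(xs) is x in xs
theorem pv_contains_ofList (xs : List (Int × Int)) (e : Int × Int) :
    PySem.Set.contains (PySem.Set.ofList xs) e = xs.contains e := by
  simp only [PySem.Set.contains_eq_listContains]
  by_cases h : e ∈ xs
  · simp [h, (PySem.Set.mem_ofList xs e).mpr h]
  · have : e ∉ PySem.Set.ofList xs := fun hm => h ((PySem.Set.mem_ofList xs e).mp hm)
    simp [h, this]

-- dropping the head bit shifts the enumerate indices by one
theorem pv_enum_shift (rest : List (Int × Int)) (b : Int) (bs : List Int) :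
    ∀ (s : Int), 0 ≤ s → ∀ base,
      (PySem.List.enumerate rest (s + 1)).foldl (pvStep (b :: bs)) base
        = (PySem.List.enumerate rest s).foldl (pvStep bs) base := by
  induction rest with
  | nil => simp [PySem.List.enumerate_nil]
  | cons e rest ih =>
    intro s hs base
    rw [PySem.List.enumerate_cons, PySem.List.enumerate_cons]
    simp only [List.foldl_cons]
    have hidx : PySem.List.pyGetD (b :: bs) (s + 1) 0 = PySem.List.pyGetD bs s 0 := by
      obtain ⟨k, rfl⟩ : ∃ k : Nat, s = (k : Int) := ⟨s.toNat, (Int.toNat_of_nonneg hs).symm⟩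
      rw [show ((k : Int) + 1) = ((k + 1 : Nat) : Int) by push_cast; ring,
        PySem.List.pyGetD_natCast, PySem.List.pyGetD_natCast]
      simp [List.getD]
    have hstep : pvStep (b :: bs) base (s + 1, e) = pvStep bs base (s, e) := by
      simp [pvStep, hidx]
    rw [hstep]
    have := ih (s + 1) (by omega) (pvStep bs base (s, e))
    rw [show s + 1 + 1 = (s + 1) + 1 by ring] at this
    exact this

-- the per-bits rebuild of A, mapped over all bit tuples, is B's backtracking recursion
theorem pv_main (free : List (Int × Int)) :
    ∀ base, (pvBits free.length).map
        (fun bits => (PySem.List.enumerate free 0).foldl (pvStep bits) base)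
      = pvGo base free := by
  induction free with
  | nil => intro base; simp [pvBits, pvGo, PySem.List.enumerate_nil]
  | cons e rest ih =>
    intro base
    show (pvBits (rest.length + 1)).map _ = _
    rw [show pvBits (rest.length + 1)
        = (pvBits rest.length).map (fun t => 0 :: t)
          ++ (pvBits rest.length).map (fun t => 1 :: t) from rfl]
    rw [List.map_append, List.map_map, List.map_map]
    have hcase : ∀ (b : Int) (bs : List Int),
        (PySem.List.enumerate (e :: rest) 0).foldl (pvStep (b :: bs)) base
          = (PySem.List.enumerate rest 0).foldl (pvStep bs) (pvStep (b :: bs) base (0, e)) := by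
      intro b bs
      rw [PySem.List.enumerate_cons]
      simp only [List.foldl_cons]
      exact pv_enum_shift rest b bs 0 le_rfl _
    have h0 : ((fun bits => (PySem.List.enumerate (e :: rest) 0).foldl (pvStep bits) base)
        ∘ (fun t => (0 : Int) :: t))
        = fun bs => (PySem.List.enumerate rest 0).foldl (pvStep bs) base := by
      funext bs
      simp only [Function.comp]
      rw [hcase 0 bs]
      congr 1
      simp [pvStep, PySem.List.pyGetD_zero_cons]
    have h1 : ((fun bits => (PySem.List.enumerate (e :: rest) 0).foldl (pvStep bits) base)
        ∘ (fun t => (1 : Int) :: t))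
        = fun bs => (PySem.List.enumerate rest 0).foldl (pvStep bs) (pvSetSym base e.1 e.2) := by
      funext bs
      simp only [Function.comp]
      rw [hcase 1 bs]
      congr 1
      simp [pvStep, PySem.List.pyGetD_zero_cons]
    rw [h0, h1, ih base, ih (pvSetSym base e.1 e.2)]
    rfl

-- ===== VERDICT (by name: the statement is the Claim_ definition above) =====
theorem generate_all_graphs_with_fixed_edges_spec : Claim_equal_generate_all_graphs_with_fixed_edges := by
  intro n fixed_edges _ _
  unfold Spec_generate_all_graphs_with_fixed_edges
  unfold generate_all_graphs_with_fixed_edges generate_all_graphs_with_fixed_edges_alt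
  simp only []
  have hfilter : (pvAllEdges n).filter (fun e => !(PySem.Set.contains (PySem.Set.ofList fixed_edges) e))
      = (pvAllEdges n).filter (fun e => !(fixed_edges.contains e)) := by
    apply List.filter_congr
    intro e _
    rw [pv_contains_ofList]
  rw [hfilter]
  exact pv_main _ _
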